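-- pv_equiv track=rewrite | github.com/cesararreolagonzalez/CC207_ProgramacionDeSistemas | [CC207] ~ Practica03/Ensamblador/f03_Ensamblador.py | evaluar_lineas_sin_contenido
-- ===== SOURCE A (Python) =====
-- def evaluar_lineas_sin_contenido(linea):
--     posicion = 0
--     if(linea[0] == '\n'):
--         estaVacia = True
--     else:
--         while( linea[posicion] != '\n' ):
--             if(linea[posicion] == ' ' or linea[posicion] == '\t'):
--                 estaVacia = True
--             else:
--                 estaVacia = False
--                 break
--             posicion += 1
--     return estaVacia
-- ===== SOURCE B (Python) =====
-- def evaluar_lineas_sin_contenido(linea):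
--     antes = linea.split('\n', 1)[0]
--     return antes.strip(' \t') == ''
-- ===== Notes on version B (the rewrite author's own statement) =====
-- stated objective: simpler
-- what changed: Replaces A's flag-and-break character scan (with its special first-char branch) by two staged library passes: split off the text before the first newline, then test that stripping spaces/tabs leaves it empty.
-- crash fix: On strings consisting only of spaces and tabs (including the empty string) A raises IndexError by running past the end, while B returns True. — e.g. on evaluar_lineas_sin_contenido(" \t"): A raises IndexError, B returns true
import Mathlib
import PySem

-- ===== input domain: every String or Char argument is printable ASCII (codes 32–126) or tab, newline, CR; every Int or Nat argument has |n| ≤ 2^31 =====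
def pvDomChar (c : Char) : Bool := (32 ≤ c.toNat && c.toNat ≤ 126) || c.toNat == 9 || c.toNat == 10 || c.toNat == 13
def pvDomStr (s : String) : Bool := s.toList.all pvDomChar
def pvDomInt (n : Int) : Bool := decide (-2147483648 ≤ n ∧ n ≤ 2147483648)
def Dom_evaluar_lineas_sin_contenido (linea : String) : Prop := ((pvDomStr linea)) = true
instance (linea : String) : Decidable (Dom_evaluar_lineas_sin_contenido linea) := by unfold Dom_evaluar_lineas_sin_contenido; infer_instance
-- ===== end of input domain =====

-- B replaces A's flag-and-break character scan by two staged library passes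
-- (split off the text before the first newline, then strip spaces/tabs and
-- compare with the empty string); objective: simpler.

-- ===== PORT A =====
-- A's while loop: advance while current char ≠ '\n'; whitespace sets the flag true
-- and continues, anything else sets it false and breaks; reaching '\n' returns the
-- flag (always true there). [] = running past the end = IndexError (excluded by Pre_).
def pvLoopA : List Char → Bool
  | [] => false          -- IndexError in Python; unreachable under Pre_
  | c :: rest =>
    if c = '\n' then true
    else if c = ' ' ∨ c = '\t' then pvLoopA rest
    else false

def evaluar_lineas_sin_contenido (linea : String) : Bool :=
  match linea.toList with
  | [] => false          -- linea[0] raises IndexError in Python; unreachable under Pre_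
  | c :: rest => if c = '\n' then true else pvLoopA (c :: rest)

-- ===== PORT B =====
-- B: antes = linea.split('\n', 1)[0]; return antes.strip(' \t') == ''
-- (split('\n', 1) always returns a non-empty list, so [0] never raises; headD "" is exact)
def evaluar_lineas_sin_contenido_alt (linea : String) : Bool :=
  let antes : String := ((PySem.Str.splitMax? linea "\n" 1).getD []).headD ""
  PySem.Str.stripChars antes " \t" == ""

-- ===== PRECONDITION & SPEC =====
-- Pre_ excludes exactly the inputs on which A raises IndexError: strings made only
-- of spaces and tabs (including the empty string), where the scan runs past the end.
def Pre_evaluar_lineas_sin_contenido (linea : String) : Prop :=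
  (linea.toList.any (fun c => c ≠ ' ' && c ≠ '\t')) = true
instance (linea : String) : Decidable (Pre_evaluar_lineas_sin_contenido linea) := by
  unfold Pre_evaluar_lineas_sin_contenido; infer_instance

def pvWitness_evaluar_lineas_sin_contenido : String := " \t\n"

-- On strings consisting only of spaces and tabs (including the empty string) A raises
-- IndexError by running past the end, while B returns True.
def Raises_evaluar_lineas_sin_contenido (linea : String) : Prop :=
  (linea.toList.all (fun c => c = ' ' || c = '\t')) = true
instance (linea : String) : Decidable (Raises_evaluar_lineas_sin_contenido linea) := by
  unfold Raises_evaluar_lineas_sin_contenido; infer_instance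

def pvRaiseWitness_evaluar_lineas_sin_contenido : String := " \t"
def pvRaiseWitnessOut_evaluar_lineas_sin_contenido : Bool := true

def Spec_evaluar_lineas_sin_contenido (linea : String) (out : Bool) : Prop :=
  out = evaluar_lineas_sin_contenido_alt linea
instance (linea : String) (out : Bool) : Decidable (Spec_evaluar_lineas_sin_contenido linea out) := by
  unfold Spec_evaluar_lineas_sin_contenido; infer_instance

-- ===== CLAIM (what is proved, stated in full; the proofs are below) =====
def Claim_equal_evaluar_lineas_sin_contenido : Prop :=
  ∀ (linea : String), Dom_evaluar_lineas_sin_contenido linea →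
    Pre_evaluar_lineas_sin_contenido linea →
    Spec_evaluar_lineas_sin_contenido linea (evaluar_lineas_sin_contenido linea)

def Claim_raises_evaluar_lineas_sin_contenido : Prop :=
  (∀ (linea : String), Dom_evaluar_lineas_sin_contenido linea →
      Raises_evaluar_lineas_sin_contenido linea → ¬ Pre_evaluar_lineas_sin_contenido linea) ∧
  (Dom_evaluar_lineas_sin_contenido (pvRaiseWitness_evaluar_lineas_sin_contenido) ∧
   Raises_evaluar_lineas_sin_contenido (pvRaiseWitness_evaluar_lineas_sin_contenido) ∧
   evaluar_lineas_sin_contenido_alt (pvRaiseWitness_evaluar_lineas_sin_contenido) =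
     pvRaiseWitnessOut_evaluar_lineas_sin_contenido)

-- ===== LEMMAS AND PROOFS =====
-- once maxsplit is exhausted, go returns the rest as one last piece
theorem pvGo_zero (sep : List Char) (fuel : Nat) (l cur : List Char) (accs : List (List Char)) :
    PySem.Chars.splitOnMax.go sep fuel 0 l cur accs = ((cur.reverse ++ l) :: accs).reverse := by
  cases fuel with
  | zero => rfl
  | succ f => cases l with
    | nil => simp [PySem.Chars.splitOnMax.go]
    | cons c rest => simp [PySem.Chars.splitOnMax.go]

-- go with sep = ['\n'], maxsplit 1: splits once at the first newline (if any)
theorem pvGo_one (fuel : Nat) : ∀ (l cur : List Char) (accs : List (List Char)),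
    l.length < fuel →
    PySem.Chars.splitOnMax.go ['\n'] fuel 1 l cur accs =
      accs.reverse ++ (cur.reverse ++ l.takeWhile (· ≠ '\n')) ::
        (if '\n' ∈ l then [(l.dropWhile (· ≠ '\n')).drop 1] else []) := by
  induction fuel with
  | zero => intro l cur accs h; omega
  | succ f ih =>
    intro l cur accs h
    cases l with
    | nil => simp [PySem.Chars.splitOnMax.go]
    | cons c rest =>
      by_cases hc : c = '\n'
      · subst hc
        rw [PySem.Chars.splitOnMax.go.eq_def]
        simp only [List.isPrefixOf, Bool.and_true, beq_self_eq_true,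
          if_true, if_neg (one_ne_zero)]
        rw [show ((1 : Nat) - 1) = 0 from rfl, pvGo_zero]
        simp [List.takeWhile, List.dropWhile]
      · rw [PySem.Chars.splitOnMax.go.eq_def]
        have h' : rest.length < f := by simp at h; omega
        simp only [List.isPrefixOf, if_neg (one_ne_zero)]
        rw [if_neg (by simp [Ne.symm hc])]
        rw [ih rest (c :: cur) accs h']
        simp [List.takeWhile, List.dropWhile, hc, Ne.symm hc]

-- the first piece of linea.split('\n', 1) is the prefix before the first newline
theorem pvAntes (linea : String) :
    (((PySem.Str.splitMax? linea "\n" 1).getD []).headD "").toList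
      = linea.toList.takeWhile (· ≠ '\n') := by
  have hb := PySem.Str.splitMax?_map linea "\n" 1
  have hsep : ("\n" : String).toList = ['\n'] := rfl
  rw [hsep] at hb
  have hs : PySem.Chars.splitMax? linea.toList ['\n'] 1
      = some (PySem.Chars.splitOnMax linea.toList ['\n'] 1) := by
    simp [PySem.Chars.splitMax?]
  rw [hs] at hb
  have hgo : PySem.Chars.splitOnMax linea.toList ['\n'] 1
      = (linea.toList.takeWhile (· ≠ '\n')) ::
        (if '\n' ∈ linea.toList then [(linea.toList.dropWhile (· ≠ '\n')).drop 1] else []) := by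
    unfold PySem.Chars.splitOnMax
    rw [if_neg (by norm_num)]
    rw [show ((1:Int).toNat) = 1 from rfl]
    rw [pvGo_one (linea.toList.length + 1) linea.toList [] [] (by omega)]
    simp
  rw [hgo] at hb
  cases hsp : PySem.Str.splitMax? linea "\n" 1 with
  | none => simp [hsp] at hb
  | some parts =>
    rw [hsp] at hb
    simp only [Option.map_some, Option.some.injEq] at hb
    cases parts with
    | nil => simp at hb
    | cons p ps =>
      simp only [List.map_cons, List.cons.injEq] at hb
      simp [hb.1]

-- stripping a char set leaves [] iff every char is in the set
theorem pvStrip_nil_iff (l chars : List Char) :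
    PySem.Chars.stripChars l chars = [] ↔ ∀ c ∈ l, chars.contains c = true := by
  unfold PySem.Chars.stripChars
  constructor
  · intro h
    rw [List.reverse_eq_nil_iff, List.dropWhile_eq_nil_iff] at h
    have hall : ∀ c ∈ List.dropWhile (fun c => chars.contains c) l, chars.contains c = true := by
      intro c hc
      exact h c (List.mem_reverse.mpr hc)
    have hnil : List.dropWhile (fun c => chars.contains c) l = [] := by
      cases hd : List.dropWhile (fun c => chars.contains c) l with
      | nil => rfl
      | cons x xs =>
        have hhead := List.head?_dropWhile_not (fun c => chars.contains c) l
        rw [hd] at hhead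
        simp only [List.head?_cons] at hhead
        have hx : chars.contains x = true := hall x (by rw [hd]; exact List.mem_cons_self)
        rw [hx] at hhead
        exact absurd hhead (by simp)
    exact List.dropWhile_eq_nil_iff.mp hnil
  · intro h
    have h1 : List.dropWhile (fun c => chars.contains c) l = [] :=
      List.dropWhile_eq_nil_iff.mpr (fun c hc => h c hc)
    simp only []
    rw [h1]
    simp

-- A's scan returns, on inputs with some non-whitespace char, exactly "everything
-- before the first newline is a space or tab"
theorem pvLoopA_eq (l : List Char) (h : ∃ c ∈ l, c ≠ ' ' ∧ c ≠ '\t') :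
    pvLoopA l = decide (∀ c ∈ l.takeWhile (· ≠ '\n'), c = ' ' ∨ c = '\t') := by
  induction l with
  | nil => simp at h
  | cons c rest ih =>
    by_cases hn : c = '\n'
    · simp [pvLoopA, hn, List.takeWhile]
    · by_cases hw : c = ' ' ∨ c = '\t'
      · have hrest : ∃ d ∈ rest, d ≠ ' ' ∧ d ≠ '\t' := by
          rcases h with ⟨d, hd, hne⟩
          rcases List.mem_cons.mp hd with rfl | hd'
          · rcases hw with rfl | rfl <;> simp at hne
          · exact ⟨d, hd', hne⟩
        simp only [pvLoopA, if_neg hn, if_pos hw, ih hrest, List.takeWhile]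
        simp [hn, hw]
      · simp only [pvLoopA, if_neg hn, if_neg hw, List.takeWhile]
        simp [hn, hw]

-- ===== VERDICT =====
theorem evaluar_lineas_sin_contenido_spec : Claim_equal_evaluar_lineas_sin_contenido := by
  intro linea _ hpre
  have hpre' : ∃ c ∈ linea.toList, c ≠ ' ' ∧ c ≠ '\t' := by
    simpa [Pre_evaluar_lineas_sin_contenido, List.any_eq_true, and_assoc] using hpre
  unfold Spec_evaluar_lineas_sin_contenido evaluar_lineas_sin_contenido
        evaluar_lineas_sin_contenido_alt
  have hA : (match linea.toList with
      | [] => false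
      | c :: rest => if c = '\n' then true else pvLoopA (c :: rest)) = pvLoopA linea.toList := by
    rcases hl : linea.toList with _ | ⟨c, rest⟩
    · exact absurd hpre' (by simp [hl])
    · by_cases hn : c = '\n' <;> simp [hn, pvLoopA]
  rw [hA, pvLoopA_eq _ hpre']
  have hstrip : (PySem.Str.stripChars (((PySem.Str.splitMax? linea "\n" 1).getD []).headD "") " \t").toList
      = PySem.Chars.stripChars (linea.toList.takeWhile (· ≠ '\n')) [' ', '\t'] := by
    rw [PySem.Str.toList_stripChars, pvAntes]
    rfl
  have hiff : (PySem.Str.stripChars (((PySem.Str.splitMax? linea "\n" 1).getD []).headD "") " \t" = "")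
      ↔ (∀ c ∈ linea.toList.takeWhile (· ≠ '\n'), c = ' ' ∨ c = '\t') := by
    constructor
    · intro h c hc
      have h2 : PySem.Chars.stripChars (linea.toList.takeWhile (· ≠ '\n')) [' ', '\t'] = [] := by
        rw [← hstrip, h]; rfl
      have := (pvStrip_nil_iff _ _).mp h2 c hc
      simpa using this
    · intro h
      have h2 : PySem.Chars.stripChars (linea.toList.takeWhile (· ≠ '\n')) [' ', '\t'] = [] :=
        (pvStrip_nil_iff _ _).mpr (fun c hc => by simpa using h c hc)
      exact String.toList_inj.mp (by rw [hstrip, h2]; rfl)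
  rw [Bool.eq_iff_iff]
  simp only [decide_eq_true_eq, beq_iff_eq]
  exact hiff.symm

theorem evaluar_lineas_sin_contenido_raises : Claim_raises_evaluar_lineas_sin_contenido := by
  unfold Claim_raises_evaluar_lineas_sin_contenido
  refine ⟨?_, by decide⟩
  intro linea _ hr hpre
  rw [Raises_evaluar_lineas_sin_contenido, List.all_eq_true] at hr
  rw [Pre_evaluar_lineas_sin_contenido, List.any_eq_true] at hpre
  rcases hpre with ⟨c, hc, hne⟩
  have := hr c hc
  simp at hne this
  rcases this with rfl | rfl
  · exact hne.1 rfl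
  · exact hne.2 rfl

-- self-check: the crash-fix witness satisfies its claim (keeps the verdict theorem referenced)
theorem pvRaiseWitness_ok :
    Raises_evaluar_lineas_sin_contenido pvRaiseWitness_evaluar_lineas_sin_contenido ∧
    evaluar_lineas_sin_contenido_alt pvRaiseWitness_evaluar_lineas_sin_contenido =
      pvRaiseWitnessOut_evaluar_lineas_sin_contenido :=
  ⟨evaluar_lineas_sin_contenido_raises.2.2.1, evaluar_lineas_sin_contenido_raises.2.2.2⟩
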